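-- pv_equiv track=rewrite | github.com/FrsECM/rag_langchain | src/rag/__init__.py | add_backline
-- ===== SOURCE A (Python) =====
-- def add_backline(text,frequency=15):
--     res = ""
--     index = 0
--     for char in str(text):
--         if char =='\n':
--             index=0
--         if char == ' ':
--             index+=1
--             if not index%frequency:
--                 res+='\n'
--                 continue
--         res+=char
--     return res
-- ===== SOURCE B (Python) =====
-- def add_backline(text, frequency=15):
--     segments = str(text).split('\n')
--     rebuilt = []
--     for seg in segments:
--         tokens = seg.split(' ')
--         parts = [tokens[0]]
--         for k, tok in enumerate(tokens[1:], 1):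
--             parts.append('\n' if k % frequency == 0 else ' ')
--             parts.append(tok)
--         rebuilt.append(''.join(parts))
--     return '\n'.join(rebuilt)
-- ===== Notes on version B (the rewrite author's own statement) =====
-- stated objective: alternative
-- what changed: Replaces A's single character-by-character scan with a running space counter by a split-and-rebuild: split the text into newline-separated segments, split each segment into space-separated tokens, and rejoin each segment with gap k becoming a newline when k % frequency == 0.
import Mathlib
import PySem

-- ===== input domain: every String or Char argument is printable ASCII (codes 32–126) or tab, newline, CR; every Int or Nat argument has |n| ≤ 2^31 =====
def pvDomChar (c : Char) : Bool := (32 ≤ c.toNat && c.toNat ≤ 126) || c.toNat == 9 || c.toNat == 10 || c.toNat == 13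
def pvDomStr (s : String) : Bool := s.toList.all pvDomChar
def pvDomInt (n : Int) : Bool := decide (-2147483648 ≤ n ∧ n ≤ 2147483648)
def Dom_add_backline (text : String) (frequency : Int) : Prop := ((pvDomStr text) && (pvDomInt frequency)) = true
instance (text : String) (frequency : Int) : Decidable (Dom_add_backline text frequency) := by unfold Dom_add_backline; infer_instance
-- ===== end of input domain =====

-- B replaces A's single character-counting scan by split-on-'\n' / split-on-' ' and a rebuild of the
-- gaps between tokens (gap k becomes '\n' when k % frequency == 0); objective: alternative decomposition.

-- ===== PORT A =====
def add_backline (text : String) (frequency : Int) : String :=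
  let st := text.toList.foldl
    (fun (acc : List Char × Int) (char : Char) =>
      let index : Int := if char = '\n' then (0 : Int) else acc.2
      if char = ' ' then
        let index := index + 1
        if PySem.Int.mod index frequency = 0 then (acc.1 ++ ['\n'], index)
        else (acc.1 ++ [char], index)
      else (acc.1 ++ [char], index))
    ([], 0)
  String.ofList st.1

-- ===== PORT B =====
def add_backline_alt (text : String) (frequency : Int) : String :=
  let segments := PySem.Chars.splitOn text.toList ['\n']
  let rebuilt := segments.foldl
    (fun (reb : List (List Char)) (seg : List Char) =>
      let tokens := PySem.Chars.splitOn seg [' ']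
      let parts := (PySem.List.enumerate (PySem.List.slice tokens (some 1) none) 1).foldl
        (fun (acc : List (List Char)) (p : Int × List Char) =>
          acc ++ [if PySem.Int.mod p.1 frequency = 0 then ['\n'] else [' ']] ++ [p.2])
        [PySem.List.pyGetD tokens 0 []]
      reb ++ [PySem.Chars.join [] parts])
    []
  String.ofList (PySem.Chars.join ['\n'] rebuilt)

-- ===== PRECONDITION & SPEC =====
-- Pre_ excludes exactly the inputs where A raises ZeroDivisionError (frequency = 0 and the text
-- contains a space); B raises the same exception there.
def Pre_add_backline (text : String) (frequency : Int) : Prop :=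
  frequency ≠ 0 ∨ ' ' ∉ text.toList
instance (text : String) (frequency : Int) : Decidable (Pre_add_backline text frequency) := by
  unfold Pre_add_backline; infer_instance
def pvWitness_add_backline : String × Int := ("hello world how are you", 3)
def Spec_add_backline (text : String) (frequency : Int) (out : String) : Prop := out = add_backline_alt text frequency
instance (text : String) (frequency : Int) (out : String) : Decidable (Spec_add_backline text frequency out) := by unfold Spec_add_backline; infer_instance

-- ===== CLAIM (what is proved, stated in full; the proofs are below) =====
def Claim_equal_add_backline : Prop := ∀ (text : String) (frequency : Int), Dom_add_backline text frequency → Pre_add_backline text frequency → Spec_add_backline text frequency (add_backline text frequency)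

-- ===== LEMMAS AND PROOFS =====

-- a single-character split, recursively
def pvSp (d : Char) : List Char → List (List Char)
  | [] => [[]]
  | c :: cs => if c = d then [] :: pvSp d cs else (pvSp d cs).modifyHead (c :: ·)

theorem pvSp_ne_nil (d : Char) (cs : List Char) : pvSp d cs ≠ [] := by
  induction cs with
  | nil => simp [pvSp]
  | cons c cs ih =>
    simp only [pvSp]
    split
    · simp
    · intro h; exact ih (by simpa using congrArg List.length h)

theorem pvSp_cons (d : Char) (cs : List Char) :
    ∃ h t, pvSp d cs = h :: t := by
  cases hsp : pvSp d cs with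
  | nil => exact absurd hsp (pvSp_ne_nil d cs)
  | cons h t => exact ⟨h, t, rfl⟩

theorem pvSp_go (d : Char) : ∀ (l : List Char) (fuel : Nat), l.length ≤ fuel →
    ∀ (cur : List Char) (acc : List (List Char)),
    PySem.Chars.splitOn.go [d] fuel l cur acc
      = acc.reverse ++ (pvSp d l).modifyHead (cur.reverse ++ ·) := by
  intro l
  induction l with
  | nil =>
    intro fuel _ cur acc
    cases fuel <;> simp [PySem.Chars.splitOn.go, pvSp]
  | cons c rest ih =>
    intro fuel hf cur acc
    cases fuel with
    | zero => simp at hf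
    | succ f =>
      rw [PySem.Chars.splitOn.go]
      simp only [List.length_cons, Nat.add_one_le_iff] at hf
      by_cases hc : c = d
      · subst hc
        rw [if_pos (by simp [List.isPrefixOf])]
        simp only [List.length_cons, List.length_nil, List.drop_succ_cons, List.drop_zero]
        rw [ih f (by omega) [] (cur.reverse :: acc)]
        simp only [pvSp]
        obtain ⟨h0, t0, hht0⟩ := pvSp_cons c rest
        simp [hht0]
      · rw [if_neg (by simp [List.isPrefixOf]; intro h; exact absurd h.symm hc)]
        rw [ih f (by omega) (c :: cur) acc]
        simp only [pvSp, if_neg hc]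
        obtain ⟨h0, t0, hht0⟩ := pvSp_cons d rest
        simp [hht0]

theorem pv_splitOn_eq (d : Char) (s : List Char) : PySem.Chars.splitOn s [d] = pvSp d s := by
  rw [PySem.Chars.splitOn, pvSp_go d s (s.length + 1) (by omega) [] []]
  obtain ⟨h, t, hht⟩ := pvSp_cons d s
  simp [hht]


-- the common specification: A's scan as a structural recursion with the running space counter
def pvF (freq : Int) : List Char → Int → List Char
  | [], _ => []
  | c :: cs, i =>
    let j : Int := if c = '\n' then 0 else i
    if c = ' ' then
      (if PySem.Int.mod (j + 1) freq = 0 then '\n' else ' ') :: pvF freq cs (j + 1)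
    else c :: pvF freq cs j

-- B's per-segment rebuild seen as a value: head token, then one separator per later token
def pvG (freq : Int) (p : Int × List Char) : List Char :=
  (if PySem.Int.mod p.1 freq = 0 then '\n' else ' ') :: p.2

def pvRb (freq i : Int) (tokens : List (List Char)) : List Char :=
  tokens.headD [] ++ (PySem.List.enumerate tokens.tail (i + 1)).flatMap (pvG freq)

-- B's whole value
def pvBv (freq i : Int) (cs : List Char) : List Char :=
  match pvSp '\n' cs with
  | [] => []
  | s0 :: ss => pvRb freq i (pvSp ' ' s0) ++ ss.flatMap (fun s => '\n' :: pvRb freq 0 (pvSp ' ' s))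
theorem pvA_fold (freq : Int) : ∀ (cs : List Char) (res : List Char) (i : Int),
    (cs.foldl
      (fun (acc : List Char × Int) (char : Char) =>
        let index : Int := if char = '\n' then (0 : Int) else acc.2
        if char = ' ' then
          let index := index + 1
          if PySem.Int.mod index freq = 0 then (acc.1 ++ ['\n'], index)
          else (acc.1 ++ [char], index)
        else (acc.1 ++ [char], index))
      (res, i)).1 = res ++ pvF freq cs i := by
  intro cs
  induction cs with
  | nil => intro res i; simp [pvF]
  | cons c cs ih =>
    intro res i
    simp only [List.foldl_cons, pvF]
    by_cases hn : c = '\n'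
    · subst hn
      norm_num
      rw [ih]
      simp
    · by_cases hs : c = ' '
      · subst hs
        norm_num [hn]
        by_cases hm : PySem.Int.mod (i + 1) freq = 0
        · rw [if_pos hm, if_pos hm, ih]
          simp
        · rw [if_neg hm, if_neg hm, ih]
          simp
      · norm_num [hn, hs]
        rw [ih]
        simp

theorem pvRb_single_nil (freq i : Int) : pvRb freq i [[]] = [] := by
  simp [pvRb]

theorem pvRb_nil_cons (freq i : Int) (h : List Char) (t : List (List Char)) :
    pvRb freq i ([] :: h :: t)
      = (if PySem.Int.mod (i + 1) freq = 0 then '\n' else ' ') :: pvRb freq (i + 1) (h :: t) := by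
  simp only [pvRb, List.tail_cons, PySem.List.enumerate_cons, List.flatMap_cons, pvG]
  simp

theorem pvRb_cons_cons (freq i : Int) (c : Char) (h : List Char) (t : List (List Char)) :
    pvRb freq i ((c :: h) :: t) = c :: pvRb freq i (h :: t) := by
  simp [pvRb]

theorem pvF_eq_pvBv (freq : Int) : ∀ (cs : List Char) (i : Int), pvF freq cs i = pvBv freq i cs := by
  intro cs
  induction cs with
  | nil =>
    intro i
    simp [pvF, pvBv, pvSp, pvRb_single_nil]
  | cons c cs ih =>
    intro i
    obtain ⟨s0, ss, hs⟩ := pvSp_cons '\n' cs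
    by_cases hn : c = '\n'
    · subst hn
      simp only [pvF]
      norm_num
      rw [ih 0]
      simp only [pvBv, pvSp, hs]
      simp [pvSp, pvRb_single_nil]
    · obtain ⟨h, t, hht⟩ := pvSp_cons ' ' s0
      by_cases hsp : c = ' '
      · subst hsp
        simp only [pvF]
        norm_num
        rw [show (if (' ' : Char) = '\n' then (0 : Int) else i) = i from if_neg (by decide)]
        rw [ih (i + 1)]
        simp only [pvBv, pvSp, hs, if_neg hn, List.modifyHead_cons, hht]
        simp only [ite_true]
        rw [pvRb_nil_cons]
        simp
      · simp only [pvF]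
        norm_num [hn, hsp]
        rw [ih i]
        simp only [pvBv, pvSp, hs, if_neg hn, List.modifyHead_cons, hht]
        rw [if_neg hsp, pvRb_cons_cons]
        simp

theorem pv_fold_two (freq : Int) : ∀ (l : List (Int × List Char)) (init : List (List Char)),
    (l.foldl (fun (acc : List (List Char)) (p : Int × List Char) =>
        acc ++ [if PySem.Int.mod p.1 freq = 0 then ['\n'] else [' ']] ++ [p.2]) init)
      = init ++ l.flatMap (fun p => [if PySem.Int.mod p.1 freq = 0 then ['\n'] else [' '], p.2]) := by
  intro l
  induction l with
  | nil => intro init; simp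
  | cons p l ih =>
    intro init
    simp only [List.foldl_cons, List.flatMap_cons, ih]
    simp

theorem pv_join_nil_flat (freq : Int) : ∀ (l : List (Int × List Char)) (h : List Char),
    PySem.Chars.join [] (h :: l.flatMap (fun p => [if PySem.Int.mod p.1 freq = 0 then ['\n'] else [' '], p.2]))
      = h ++ l.flatMap (pvG freq) := by
  intro l
  induction l with
  | nil => intro h; simp only [List.flatMap_nil, List.append_nil]; rw [PySem.Chars.join_singleton]
  | cons p l ih =>
    intro h
    simp only [List.flatMap_cons, List.cons_append]
    rw [PySem.Chars.join_cons_cons, PySem.Chars.join_cons_cons]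
    simp only [List.append_nil, List.nil_append]
    rw [ih]
    by_cases hm : PySem.Int.mod p.1 freq = 0 <;> simp [pvG, hm]

theorem pv_join_newline : ∀ (l : List (List Char)) (x : List Char),
    PySem.Chars.join ['\n'] (x :: l) = x ++ l.flatMap (fun s => '\n' :: s) := by
  intro l
  induction l with
  | nil => intro x; rw [PySem.Chars.join_singleton]; simp
  | cons y l ih =>
    intro x
    rw [PySem.Chars.join_cons_cons, ih]
    simp

theorem pv_seg (freq : Int) (seg : List Char) :
    PySem.Chars.join []
      ((PySem.List.enumerate (PySem.List.slice (pvSp ' ' seg) (some 1) none) 1).foldl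
        (fun (acc : List (List Char)) (p : Int × List Char) =>
          acc ++ [if PySem.Int.mod p.1 freq = 0 then ['\n'] else [' ']] ++ [p.2])
        [PySem.List.pyGetD (pvSp ' ' seg) 0 []])
      = pvRb freq 0 (pvSp ' ' seg) := by
  obtain ⟨h, t, hht⟩ := pvSp_cons ' ' seg
  rw [hht]
  rw [PySem.List.slice_from_one]
  rw [pv_fold_two]
  have h0 : PySem.List.pyGetD (h :: t) (0 : Int) [] = h := by
    simp [PySem.List.pyGetD, PySem.List.pyGet?, PySem.List.pyIdx?]
  rw [h0]
  simp only [List.singleton_append, List.tail_cons]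
  rw [pv_join_nil_flat]
  simp [pvRb]

theorem pvAlt_eq (text : String) (freq : Int) :
    add_backline_alt text freq = String.ofList (pvBv freq 0 text.toList) := by
  rw [add_backline_alt]
  simp only [pv_splitOn_eq]
  obtain ⟨s0, ss, hs⟩ := pvSp_cons '\n' text.toList
  rw [hs]
  rw [PySem.List.foldl_append_singleton_eq_map]
  simp only [List.map_cons, List.nil_append]
  rw [pv_join_newline]
  simp only [pv_seg]
  have hflat : ∀ (l : List (List Char)),
      l.flatMap (fun s => '\n' :: pvRb freq 0 (pvSp ' ' s))
        = (l.map (fun seg => pvRb freq 0 (pvSp ' ' seg))).flatMap (fun s => '\n' :: s) := by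
    intro l
    induction l with
    | nil => simp
    | cons y l ih => simp [ih]
  rw [pvBv, hs, ← hflat ss]

-- ===== VERDICT (by name: the statement is the Claim_ definition above) =====
theorem add_backline_spec : Claim_equal_add_backline := by
  intro text freq _ _
  show add_backline text freq = add_backline_alt text freq
  rw [pvAlt_eq, add_backline]
  simp only [pvA_fold freq text.toList [] 0, List.nil_append]
  rw [pvF_eq_pvBv]
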